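-- pv_equiv track=rewrite | github.com/Krayushkin68/ya-algorithms | sprint4/C.py | to_common_alphabet
-- ===== SOURCE A (Python) =====
-- from string import ascii_lowercase
--
-- def to_common_alphabet(string: str) -> str:
--     alphabet = ascii_lowercase
--     char_map = {}
--     last_char_idx = 0
--     converted = []
--
--     for char in string:
--         if char not in char_map:
--             char_map[char] = alphabet[last_char_idx]
--             last_char_idx += 1
--
--         converted.append(char_map[char])
--
--     return ''.join(converted)
-- ===== SOURCE B (Python) =====
-- from string import ascii_lowercase
--
--
-- def to_common_alphabet(string: str) -> str:
--     # Each character's label is determined positionally: the rank of a character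
--     # is the number of distinct characters in the prefix ending at its first
--     # occurrence, minus one.  No mapping is maintained; the rank is recomputed
--     # from the prefix for every character.
--     return ''.join(
--         ascii_lowercase[len(set(string[:string.index(c) + 1])) - 1]
--         for c in string
--     )
-- ===== Notes on version B (the rewrite author's own statement) =====
-- stated objective: alternative
-- what changed: Drops A's incrementally-maintained char->letter dict and counter entirely: B computes each character's label independently as ascii_lowercase[len(set(prefix up to the character's first occurrence)) - 1], i.e. a per-character rank recomputed from scratch by nested prefix scans instead of one stateful pass.
import Mathlib
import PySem

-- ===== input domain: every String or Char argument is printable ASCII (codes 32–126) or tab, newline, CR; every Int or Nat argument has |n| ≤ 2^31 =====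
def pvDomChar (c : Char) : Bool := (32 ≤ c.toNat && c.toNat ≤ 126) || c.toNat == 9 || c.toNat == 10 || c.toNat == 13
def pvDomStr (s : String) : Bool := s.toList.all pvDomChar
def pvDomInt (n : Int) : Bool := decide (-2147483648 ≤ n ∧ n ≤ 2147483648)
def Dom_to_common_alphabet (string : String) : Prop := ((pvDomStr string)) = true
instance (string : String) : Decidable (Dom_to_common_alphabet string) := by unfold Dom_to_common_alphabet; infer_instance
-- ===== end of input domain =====

-- B drops A's stateful dict+counter pass: each character's label is recomputed
-- independently as the distinct-count of the prefix up to its first occurrence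
-- (a stateless quadratic alternative, not faster).

-- ascii_lowercase
def pyAlphabet : List Char :=
  ['a','b','c','d','e','f','g','h','i','j','k','l','m',
   'n','o','p','q','r','s','t','u','v','w','x','y','z']

-- ascii_lowercase[i]; Pre_ excludes the inputs (a 27th distinct character) where
-- Python raises IndexError, so the '?' default is never reached inside Pre_.
def alphGet (i : Int) : Char := (PySem.List.pyGet? pyAlphabet i).getD '?'

-- ===== PORT A =====
-- one loop iteration of A: test membership, maybe assign the next letter, emit
def stepA (st : PySem.Dict Char Char × Nat × List Char) (c : Char) :
    PySem.Dict Char Char × Nat × List Char :=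
  match st with
  | (cm, i, conv) =>
    if cm.contains c then (cm, i, conv ++ [cm.getD c '?'])
    else
      let cm' := cm.insert c (alphGet (i : Int))
      (cm', i + 1, conv ++ [cm'.getD c '?'])

def to_common_alphabet (string : String) : String :=
  String.ofList (string.toList.foldl stepA (PySem.Dict.empty, 0, [])).2.2

-- ===== PORT B =====
def to_common_alphabet_alt (string : String) : String :=
  String.ofList (string.toList.map (fun c =>
    let j := (PySem.List.index? string.toList c).getD 0             -- string.index(c); c is in string, so never the default
    let prefx := PySem.List.slice string.toList none (some ((j : Int) + 1))  -- string[:j+1]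
    alphGet (((PySem.Set.ofList prefx).length : Int) - 1)))         -- ascii_lowercase[len(set(prefx)) - 1]

-- ===== PRECONDITION & SPEC =====
-- Pre_ excludes strings with more than 26 distinct characters, on which both
-- Pythons raise IndexError (ascii_lowercase[26]).
def Pre_to_common_alphabet (string : String) : Prop :=
  (PySem.List.dedup string.toList).length ≤ 26
instance (string : String) : Decidable (Pre_to_common_alphabet string) := by
  unfold Pre_to_common_alphabet; infer_instance

def pvWitness_to_common_alphabet : String := "hello, world"

def Spec_to_common_alphabet (string : String) (out : String) : Prop := out = to_common_alphabet_alt string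
instance (string : String) (out : String) : Decidable (Spec_to_common_alphabet string out) := by unfold Spec_to_common_alphabet; infer_instance

-- ===== CLAIM (what is proved, stated in full; the proofs are below) =====
def Claim_equal_to_common_alphabet : Prop := ∀ (string : String), Dom_to_common_alphabet string → Pre_to_common_alphabet string → Spec_to_common_alphabet string (to_common_alphabet string)

-- ===== LEMMAS AND PROOFS =====

-- the loop invariant for A, proved by right-to-left induction over the string:
-- A's state is the first-occurrence table, the distinct count and the labels so far
def tbl (u : List Char) : PySem.Dict Char Char :=
  (PySem.List.enumerate u 0).foldl (fun d p => d.insert p.2 (alphGet p.1)) PySem.Dict.empty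

lemma enumerate_snoc (x : Char) : ∀ (xs : List Char) (s : Int),
    PySem.List.enumerate (xs ++ [x]) s
      = PySem.List.enumerate xs s ++ [(s + xs.length, x)] := by
  intro xs
  induction xs with
  | nil => intro s; simp [PySem.List.enumerate_cons, PySem.List.enumerate_nil]
  | cons y ys ih =>
      intro s
      simp [PySem.List.enumerate_cons, ih (s + 1)]
      ring_nf

lemma tblAux_get (u : List Char) : ∀ (s : Int) (d : PySem.Dict Char Char) (c : Char),
    u.Nodup →
    ((PySem.List.enumerate u s).foldl (fun d p => d.insert p.2 (alphGet p.1)) d).get? c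
      = if c ∈ u then some (alphGet (s + (u.idxOf c : Int))) else d.get? c := by
  induction u with
  | nil => intro s d c _; simp [PySem.List.enumerate_nil]
  | cons x xs ih =>
      intro s d c hnd
      rw [PySem.List.enumerate_cons]
      simp only [List.foldl_cons]
      rw [ih (s + 1) _ c hnd.of_cons]
      by_cases hcx : c = x
      · subst hcx
        have hcxs : c ∉ xs := (List.nodup_cons.mp hnd).1
        simp [hcxs, PySem.Dict.get?_insert_self]
      · rw [PySem.Dict.get?_insert_of_ne _ _ (fun h => hcx h)]
        by_cases hm : c ∈ xs
        · have : List.idxOf c (x :: xs) = List.idxOf c xs + 1 := by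
            have hbe : (x == c) = false := by
              simp only [beq_eq_false_iff_ne, ne_eq]
              intro h
              exact hcx h.symm
            simp [List.idxOf_cons, hbe]
          simp only [hm, if_true, List.mem_cons, hcx, false_or, this]
          congr 2
          push_cast
          ring
        · simp [hm, hcx]

lemma tbl_get (u : List Char) (hnd : u.Nodup) (c : Char) :
    (tbl u).get? c = if c ∈ u then some (alphGet (u.idxOf c : Int)) else none := by
  unfold tbl
  rw [tblAux_get u 0 _ c hnd]
  simp

lemma tbl_snoc (u : List Char) (c : Char) :
    tbl (u ++ [c]) = (tbl u).insert c (alphGet (u.length : Int)) := by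
  unfold tbl
  rw [enumerate_snoc, List.foldl_append]
  simp

lemma A_loop (l : List Char) :
    l.foldl stepA (PySem.Dict.empty, 0, [])
      = (tbl (PySem.Set.ofList l), (PySem.Set.ofList l).length,
         l.map (fun c => alphGet (((PySem.Set.ofList l).idxOf c : Nat) : Int))) := by
  induction l using List.reverseRecOn with
  | nil => simp [tbl, PySem.Set.ofList_nil, PySem.List.enumerate_nil]
  | append_singleton l c ih =>
      rw [List.foldl_append, List.foldl_cons, List.foldl_nil, ih]
      set u := PySem.Set.ofList l with hu
      have hnd : u.Nodup := PySem.Set.nodup_ofList l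
      by_cases hc : c ∈ u
      · -- seen before: dict and index unchanged
        have hcont : (tbl u).contains c = true := by
          rw [PySem.Dict.contains_eq_isSome_get?, tbl_get u hnd c]
          simp [hc]
        have hofl : PySem.Set.ofList (l ++ [c]) = u := by
          rw [PySem.Set.ofList_append_singleton, ← hu, PySem.Set.add]
          simp [hc]
        simp only [stepA, hcont, if_true, hofl, Prod.mk.injEq]
        refine ⟨by trivial, by trivial, ?_⟩
        rw [List.map_append]
        congr 1
        simp [PySem.Dict.getD_eq_get?_getD, tbl_get u hnd c, hc]
      · -- new character: gets the next letter, appended to the table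
        have hcont : (tbl u).contains c = false := by
          rw [PySem.Dict.contains_eq_isSome_get?, tbl_get u hnd c]
          simp [hc]
        have hofl : PySem.Set.ofList (l ++ [c]) = u ++ [c] := by
          rw [PySem.Set.ofList_append_singleton, ← hu, PySem.Set.add]
          simp [hc]
        simp only [stepA, hcont, Bool.false_eq_true, if_false, hofl, Prod.mk.injEq]
        refine ⟨(tbl_snoc u c).symm, by simp, ?_⟩
        rw [List.map_append]
        congr 1
        · -- earlier characters keep their index
          apply List.map_congr_left
          intro a ha
          have hau : a ∈ u := by rw [hu, PySem.Set.mem_ofList]; exact ha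
          rw [List.idxOf_append_of_mem hau]
        · -- the new character is at position u.length
          have : List.idxOf c (u ++ [c]) = u.length := by
            rw [List.idxOf_append_of_notMem hc]
            simp
          simp [PySem.Dict.getD_eq_get?_getD, PySem.Dict.get?_insert_self, this]

-- string.index(c) on a member returns the first index
lemma index?_of_mem (l : List Char) (c : Char) (h : c ∈ l) :
    PySem.List.index? l c = some (l.idxOf c) := by
  rw [PySem.List.index?_eq_idxOf?]
  induction l with
  | nil => cases h
  | cons x xs ih =>
      by_cases hx : x = c
      · subst hx; simp [List.idxOf?_cons]
      · have hbe : (x == c) = false := by simpa using hx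
        have hcx : c ∈ xs := by
          rcases List.mem_cons.mp h with h1 | h1
          · exact absurd h1.symm hx
          · exact h1
        simp [List.idxOf?_cons, List.idxOf_cons, hbe, ih hcx]

-- B's rank: the distinct-count of the prefix ending at c's first occurrence
-- equals c's position in the first-occurrence list, plus one
lemma prefix_rank (l : List Char) : ∀ c ∈ l,
    (PySem.Set.ofList (l.take (l.idxOf c + 1))).length
      = (PySem.Set.ofList l).idxOf c + 1 := by
  induction l using List.reverseRecOn with
  | nil => intro c hc; cases hc
  | append_singleton l a ih =>
      intro c hc
      by_cases hcl : c ∈ l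
      · have hlt : l.idxOf c < l.length := List.idxOf_lt_length_of_mem hcl
        rw [List.idxOf_append_of_mem hcl,
            List.take_append_of_le_length (by omega)]
        rw [PySem.Set.ofList_append_singleton]
        by_cases ha : a ∈ PySem.Set.ofList l
        · rw [PySem.Set.add_of_mem ha]
          exact ih c hcl
        · rw [PySem.Set.add_of_not_mem ha,
              List.idxOf_append_of_mem (by rw [PySem.Set.mem_ofList]; exact hcl)]
          exact ih c hcl
      · have hca : c = a := by
          rcases List.mem_append.mp hc with h | h
          · exact absurd h hcl
          · simpa using h
        subst hca
        have hcs : c ∉ PySem.Set.ofList l := by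
          rw [PySem.Set.mem_ofList]; exact hcl
        rw [List.idxOf_append_of_notMem hcl]
        simp only [List.idxOf_cons_self, Nat.add_zero]
        rw [List.take_of_length_le (by simp)]
        rw [PySem.Set.ofList_append_singleton, PySem.Set.add_of_not_mem hcs,
            List.idxOf_append_of_notMem hcs]
        simp

-- ===== VERDICT (by name: the statement is the Claim_ definition above) =====
theorem to_common_alphabet_spec : Claim_equal_to_common_alphabet := by
  intro s _ _
  unfold Spec_to_common_alphabet to_common_alphabet to_common_alphabet_alt
  rw [A_loop]
  congr 1
  apply List.map_congr_left
  intro c hc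
  rw [index?_of_mem s.toList c hc]
  simp only [Option.getD_some]
  have : PySem.List.slice s.toList none (some ((s.toList.idxOf c : Int) + 1))
      = s.toList.take (s.toList.idxOf c + 1) := by
    rw [show ((s.toList.idxOf c : Int) + 1) = ((s.toList.idxOf c + 1 : Nat) : Int) by push_cast; ring,
        PySem.List.slice_to_natCast]
  rw [this, prefix_rank s.toList c hc]
  congr 1
  push_cast
  ring
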